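-- pv_equiv track=rewrite | github.com/DeibyArizac/OAM | oam_decoder.py | bitstream_to_bytes
-- ===== SOURCE A (Python) =====
-- def bitstream_to_bytes(bitstream):
--     """Convert bitstream back to bytes (inverse of bitstream_from_bytes)
--
--     LSB-first: bits[0] = bit0 (LSB), bits[7] = bit7 (MSB)
--
--     Ejemplo:
--         bits = [1,0,1,1,0,0,1,0] (LSB-first)
--                 0 1 2 3 4 5 6 7 (posiciones)
--         byte = bit0<<0 | bit1<<1 | ... | bit7<<7
--              = 1<<0 | 0<<1 | 1<<2 | 1<<3 | 0<<4 | 0<<5 | 1<<6 | 0<<7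
--              = 0x4D
--     """
--     bytes_list = []
--     # Process 8 bits at a time (LSB first)
--     for i in range(0, len(bitstream), 8):
--         byte_bits = bitstream[i:i+8]
--         # Pad with zeros if incomplete byte
--         while len(byte_bits) < 8:
--             byte_bits.append(0)
--
--         # Convert bits to byte (LSB first)
--         byte_val = 0
--         for j, bit in enumerate(byte_bits):
--             byte_val |= (bit << j)  # LSB first: bit position j goes to bit j
--
--         bytes_list.append(byte_val)
--
--     return bytes_list
-- ===== SOURCE B (Python) =====
-- def bitstream_to_bytes(bitstream):
--     """Convert bitstream back to bytes (single flat pass, LSB-first)."""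
--     bytes_list = []
--     byte_val = 0
--     for idx, bit in enumerate(bitstream):
--         byte_val |= bit << (idx % 8)
--         if idx % 8 == 7:
--             bytes_list.append(byte_val)
--             byte_val = 0
--     if len(bitstream) % 8 != 0:
--         bytes_list.append(byte_val)
--     return bytes_list
-- ===== Notes on version B (the rewrite author's own statement) =====
-- stated objective: simpler
-- what changed: Replaces the slice-per-chunk structure (range step 8, slicing, a padding while-loop and an inner enumerate loop per chunk) with one flat enumerate pass keeping a running byte accumulator, appending it every 8th bit and once more at the end for a trailing partial byte.
import Mathlib
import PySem

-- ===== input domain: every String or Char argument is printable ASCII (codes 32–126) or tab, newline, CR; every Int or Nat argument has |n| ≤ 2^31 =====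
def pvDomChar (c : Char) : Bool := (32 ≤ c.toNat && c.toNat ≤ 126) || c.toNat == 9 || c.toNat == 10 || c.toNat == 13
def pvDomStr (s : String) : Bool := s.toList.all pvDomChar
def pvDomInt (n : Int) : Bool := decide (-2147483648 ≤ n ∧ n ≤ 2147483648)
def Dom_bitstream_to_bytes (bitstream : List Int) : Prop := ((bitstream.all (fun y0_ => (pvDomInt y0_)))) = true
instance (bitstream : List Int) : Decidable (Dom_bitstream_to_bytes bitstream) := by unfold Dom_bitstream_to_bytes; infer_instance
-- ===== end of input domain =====

-- B changes the decomposition only: one flat pass with a running accumulator instead of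
-- per-chunk slicing/padding; same O(n) cost, return values proved equal on all inputs.

-- ===== PORT A =====
-- the `while len(byte_bits) < 8: byte_bits.append(0)` padding loop
def pvPad8 (bits : List Int) : List Int :=
  if bits.length < 8 then pvPad8 (bits ++ [0]) else bits
termination_by 8 - bits.length
decreasing_by simp; omega

def bitstream_to_bytes (bitstream : List Int) : List Int :=
  (PySem.List.pyRange 0 (bitstream.length : Int) 8).foldl
    (fun bytes_list i =>
      let byte_bits := pvPad8 (PySem.List.slice bitstream (some i) (some (i + 8)))
      let byte_val := (PySem.List.enumerate byte_bits 0).foldl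
        (fun v p => PySem.Int.bor v (p.2 <<< p.1.toNat)) 0
      bytes_list ++ [byte_val]) []

-- ===== PORT B =====
def bitstream_to_bytes_alt (bitstream : List Int) : List Int :=
  let st := (PySem.List.enumerate bitstream 0).foldl
    (fun (st : List Int × Int) (p : Int × Int) =>
      let v := PySem.Int.bor st.2 (p.2 <<< (PySem.Int.mod p.1 8).toNat)
      if PySem.Int.mod p.1 8 = 7 then (st.1 ++ [v], 0) else (st.1, v))
    ([], 0)
  if PySem.Int.mod (bitstream.length : Int) 8 ≠ 0 then st.1 ++ [st.2] else st.1

-- ===== PRECONDITION & SPEC =====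
def Spec_bitstream_to_bytes (bitstream : List Int) (out : List Int) : Prop := out = bitstream_to_bytes_alt bitstream
instance (bitstream : List Int) (out : List Int) : Decidable (Spec_bitstream_to_bytes bitstream out) := by unfold Spec_bitstream_to_bytes; infer_instance

-- ===== CLAIM (what is proved, stated in full; the proofs are below) =====
def Claim_equal_bitstream_to_bytes : Prop := ∀ (bitstream : List Int), Dom_bitstream_to_bytes bitstream → Spec_bitstream_to_bytes bitstream (bitstream_to_bytes bitstream)

-- ===== LEMMAS AND PROOFS =====

-- the value of one byte: bits of `c` placed at positions j, j+1, …
def pvInner : List Int → Nat → Int → Int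
  | [], _, v => v
  | b :: t, j, v => pvInner t (j + 1) (PySem.Int.bor v (b <<< j))

-- both programs compute the list of per-8-chunk byte values
def pvChunks (bs : List Int) : List Int :=
  if h : bs = [] then [] else pvInner (bs.take 8) 0 0 :: pvChunks (bs.drop 8)
termination_by bs.length
decreasing_by
  simp
  exact List.length_pos_iff.mpr h

lemma pvInner_append_zero (c : List Int) (j : Nat) (v : Int) :
    pvInner (c ++ [0]) j v = pvInner c j v := by
  induction c generalizing j v with
  | nil => simp [pvInner]
  | cons b t ih => simp [pvInner, ih]

lemma pvInner_pad8 (c : List Int) (j : Nat) (v : Int) :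
    pvInner (pvPad8 c) j v = pvInner c j v := by
  fun_induction pvPad8 c with
  | case1 c hlt ih => rw [ih, pvInner_append_zero]
  | case2 c h => rfl

lemma pvInner_append_singleton (c : List Int) (b : Int) (j : Nat) (v : Int) :
    pvInner (c ++ [b]) j v = PySem.Int.bor (pvInner c j v) (b <<< (j + c.length)) := by
  induction c generalizing j v with
  | nil => simp [pvInner]
  | cons x t ih => simp [pvInner, ih]; ring_nf

-- A's inner enumerate fold is pvInner
lemma enumFold_eq_pvInner (c : List Int) (s : Nat) (v : Int) :
    (PySem.List.enumerate c (s : Int)).foldl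
      (fun v p => PySem.Int.bor v (p.2 <<< p.1.toNat)) v = pvInner c s v := by
  induction c generalizing s v with
  | nil => simp [PySem.List.enumerate_nil, pvInner]
  | cons b t ih =>
    rw [PySem.List.enumerate_cons]
    simp only [List.foldl_cons, Int.toNat_natCast, pvInner]
    have : ((s : Int) + 1) = ((s + 1 : Nat) : Int) := by push_cast; ring
    rw [this, ih]

lemma range8_split (b : Int) (h : 0 < b) :
    PySem.List.pyRange 0 b 8 = 0 :: (PySem.List.pyRange 0 (b - 8) 8).map (· + 8) := by
  rw [PySem.List.pyRange_of_pos _ _ (by norm_num), PySem.List.pyRange_of_pos _ _ (by norm_num)]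
  have hm : ((b - 0 + 8 - 1) / 8).toNat = ((b - 8 - 0 + 8 - 1) / 8).toNat + 1 := by omega
  rw [if_pos h, hm, List.range_succ_eq_map]
  by_cases h8 : 0 < b - 8
  · rw [if_pos h8]
    simp [List.map_map, Function.comp]
    intro a _
    ring
  · rw [if_neg h8]
    have h0 : ((b - 8 - 0 + 8 - 1) / 8).toNat = 0 := by omega
    rw [h0]
    simp

lemma enumFold0 (c : List Int) (v : Int) :
    (PySem.List.enumerate c 0).foldl
      (fun v p => PySem.Int.bor v (p.2 <<< p.1.toNat)) v = pvInner c 0 v := by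
  have := enumFold_eq_pvInner c 0 v
  simpa using this


lemma A_map (bs : List Int) :
    bitstream_to_bytes bs =
      (PySem.List.pyRange 0 (bs.length : Int) 8).map
        (fun i => pvInner (PySem.List.slice bs (some i) (some (i + 8))) 0 0) := by
  unfold bitstream_to_bytes
  simp only [enumFold0, pvInner_pad8]
  exact PySem.List.foldl_append_singleton_eq_map _ _ []


-- A equals the chunk decomposition
lemma A_eq_chunks (bs : List Int) : bitstream_to_bytes bs = pvChunks bs := by
  rw [A_map]
  induction hn : bs.length using Nat.strong_induction_on generalizing bs with
  | _ n ih =>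
  subst hn
  match hbs : bs with
  | [] => simp [pvChunks, PySem.List.pyRange_of_pos _ _ (by norm_num : (0:Int) < 8)]
  | x :: t =>
    have hpos : 0 < ((x :: t).length : Int) := Int.natCast_pos.mpr (by simp)
    rw [range8_split _ hpos, pvChunks]
    simp only [List.map_cons, List.map_map]
    rw [dif_neg (List.cons_ne_nil x t)]
    congr 1
    · -- head: slice bs 0 8 = take 8 bs
      congr 1
      have : ((0:Int) + 8) = (8:Int) := by norm_num
      rw [this, PySem.List.slice_zero_start, PySem.List.slice_to _ (by norm_num)]
      rfl
    · -- tail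
      have hEq : PySem.List.pyRange 0 (((x :: t).length : Int) - 8) 8
          = PySem.List.pyRange 0 ((((x :: t).drop 8).length : Int)) 8 := by
        by_cases h8 : 8 ≤ (x :: t).length
        · congr 1
          simp only [List.length_cons, List.length_drop] at h8 ⊢
          push_cast
          omega
        · rw [PySem.List.pyRange_of_pos _ _ (by norm_num : (0:Int) < 8),
              PySem.List.pyRange_of_pos _ _ (by norm_num : (0:Int) < 8)]
          have h1 : ¬ ((0:Int) < ((x :: t).length : Int) - 8) := by
            simp only [List.length_cons] at h8 ⊢
            push_cast
            omega
          have h2 : (((x :: t).drop 8).length) = 0 := by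
            simp only [List.length_drop, List.length_cons] at h8 ⊢
            omega
          rw [if_neg h1, h2]
          simp
      rw [hEq]
      have hIH := ih ((x :: t).drop 8).length
        (by simp only [List.length_drop, List.length_cons]; omega) ((x :: t).drop 8) rfl
      rw [← hIH]
      apply List.map_congr_left
      intro k hk
      have hk0 : 0 ≤ k :=
        ((PySem.List.mem_pyRange_iff_of_pos (by norm_num : (0:Int) < 8) k).mp hk).1
      obtain ⟨m, rfl⟩ : ∃ m : Nat, k = (m : Int) := ⟨k.toNat, (Int.toNat_of_nonneg hk0).symm⟩
      simp only [Function.comp_apply]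
      have L := PySem.List.slice_natCast_add (x :: t) (m + 8) 8
      have R := PySem.List.slice_natCast_add ((x :: t).drop 8) m 8
      push_cast at L R ⊢
      rw [show ((m:Int) + 8 + 8) = ((m:Int) + 8) + 8 by ring] at *
      rw [L, R, List.drop_drop]
      rw [show m + 8 = 8 + m by ring]

lemma chunk_partial (c : List Int) : ∀ (s : Int) (q j : Nat), s = 8*(q:Int) + (j:Int) →
    j + c.length ≤ 7 → ∀ (v : Int) (out : List Int),
    (PySem.List.enumerate c s).foldl
      (fun (st : List Int × Int) (p : Int × Int) =>
        let v := PySem.Int.bor st.2 (p.2 <<< (PySem.Int.mod p.1 8).toNat)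
        if PySem.Int.mod p.1 8 = 7 then (st.1 ++ [v], 0) else (st.1, v))
      (out, v) = (out, pvInner c j v) := by
  induction c with
  | nil => intro s q j hs hj v out; simp [PySem.List.enumerate_nil, pvInner]
  | cons b t ih =>
    intro s q j hs hj v out
    rw [PySem.List.enumerate_cons]
    have hm : PySem.Int.mod s 8 = (j : Int) := by
      rw [PySem.Int.mod_eq_emod_of_pos (by norm_num)]
      simp at hj
      omega
    have hj7 : ((j : Int) ≠ 7) := by simp at hj ⊢; omega
    simp only [List.foldl_cons, hm, if_neg hj7, Int.toNat_natCast]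
    exact ih (s + 1) q (j + 1) (by push_cast [hs]; ring) (by simp at hj ⊢; omega) _ out


lemma chunk_full (c : List Int) (h : c.length = 8) (s : Int) (q : Nat) (hs : s = 8*(q:Int))
    (out : List Int) :
    (PySem.List.enumerate c s).foldl
      (fun (st : List Int × Int) (p : Int × Int) =>
        let v := PySem.Int.bor st.2 (p.2 <<< (PySem.Int.mod p.1 8).toNat)
        if PySem.Int.mod p.1 8 = 7 then (st.1 ++ [v], 0) else (st.1, v))
      (out, 0) = (out ++ [pvInner c 0 0], 0) := by
  have hne : c ≠ [] := by intro hc; rw [hc] at h; simp at h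
  obtain ⟨c7, b, rfl⟩ : ∃ c7 b, c = c7 ++ [b] := ⟨c.dropLast, c.getLast hne, (List.dropLast_append_getLast hne).symm⟩
  have h7 : c7.length = 7 := by simp at h; omega
  rw [PySem.List.enumerate_append, List.foldl_append]
  rw [chunk_partial c7 s q 0 (by simpa using hs) (by omega) 0 out]
  have hm : PySem.Int.mod (s + (c7.length : Int)) 8 = 7 := by
    rw [PySem.Int.mod_eq_emod_of_pos (by norm_num)]
    rw [h7, hs]
    omega
  simp only [PySem.List.enumerate_cons, PySem.List.enumerate_nil, List.foldl_cons, List.foldl_nil,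
    hm]
  rw [pvInner_append_singleton]
  rw [h7]
  simp


lemma B_main : ∀ (n : Nat) (bs : List Int), bs.length = n → ∀ (q : Nat) (out : List Int),
    (if PySem.Int.mod ((bs.length : Nat) : Int) 8 ≠ 0
     then ((PySem.List.enumerate bs (8*(q:Int))).foldl
        (fun (st : List Int × Int) (p : Int × Int) =>
          let v := PySem.Int.bor st.2 (p.2 <<< (PySem.Int.mod p.1 8).toNat)
          if PySem.Int.mod p.1 8 = 7 then (st.1 ++ [v], 0) else (st.1, v)) (out, 0)).1
       ++ [((PySem.List.enumerate bs (8*(q:Int))).foldl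
        (fun (st : List Int × Int) (p : Int × Int) =>
          let v := PySem.Int.bor st.2 (p.2 <<< (PySem.Int.mod p.1 8).toNat)
          if PySem.Int.mod p.1 8 = 7 then (st.1 ++ [v], 0) else (st.1, v)) (out, 0)).2]
     else ((PySem.List.enumerate bs (8*(q:Int))).foldl
        (fun (st : List Int × Int) (p : Int × Int) =>
          let v := PySem.Int.bor st.2 (p.2 <<< (PySem.Int.mod p.1 8).toNat)
          if PySem.Int.mod p.1 8 = 7 then (st.1 ++ [v], 0) else (st.1, v)) (out, 0)).1)
    = out ++ pvChunks bs := by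
  intro n
  induction n using Nat.strong_induction_on with
  | _ n ih =>
  intro bs hn q out
  by_cases hnil : bs = []
  · subst hnil
    simp [PySem.List.enumerate_nil, pvChunks, PySem.Int.mod]
  · by_cases h8 : bs.length ≤ 7
    · -- partial final chunk
      rw [chunk_partial bs (8*(q:Int)) q 0 (by simp) (by omega) 0 out]
      have hmod : PySem.Int.mod ((bs.length : Nat) : Int) 8 ≠ 0 := by
        rw [PySem.Int.mod_eq_emod_of_pos (by norm_num)]
        have : 0 < bs.length := List.length_pos_iff.mpr hnil
        omega
      rw [if_pos hmod, pvChunks, dif_neg hnil]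
      rw [List.take_of_length_le (by omega), List.drop_of_length_le (by omega), pvChunks]
      simp
    · -- full leading chunk
      have hsplit := List.take_append_drop 8 bs
      have hlen8 : (bs.take 8).length = 8 := by simp; omega
      conv_lhs => rw [← hsplit]
      rw [PySem.List.enumerate_append, List.foldl_append,
        chunk_full (bs.take 8) hlen8 _ q rfl out]
      have hstart : 8*(q:Int) + ((bs.take 8).length : Int) = 8*((q+1 : Nat):Int) := by
        rw [hlen8]; push_cast; ring
      rw [hstart]
      have hIH := ih (bs.drop 8).length (by simp; omega) (bs.drop 8) rfl (q+1)
        (out ++ [pvInner (bs.take 8) 0 0])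
      have hchunks : pvChunks bs = pvInner (bs.take 8) 0 0 :: pvChunks (bs.drop 8) := by
        rw [pvChunks, dif_neg hnil]
      rw [hchunks]
      by_cases hc : PySem.Int.mod ((((bs.drop 8).length : Nat)) : Int) 8 = 0
      · have hc' : PySem.Int.mod (((bs.take 8 ++ bs.drop 8).length : Nat) : Int) 8 = 0 := by
          rw [PySem.Int.mod_eq_emod_of_pos (by norm_num)] at hc ⊢
          simp only [List.take_append_drop, List.length_drop] at hc ⊢
          omega
        rw [if_neg (not_not_intro hc'), if_neg (not_not_intro hc)] at *
        rw [hIH]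
        simp
      · have hc' : ¬ PySem.Int.mod (((bs.take 8 ++ bs.drop 8).length : Nat) : Int) 8 = 0 := by
          rw [PySem.Int.mod_eq_emod_of_pos (by norm_num)] at hc ⊢
          simp only [List.take_append_drop, List.length_drop] at hc ⊢
          omega
        rw [if_pos hc', if_pos hc] at *
        rw [hIH]
        simp


-- B equals the chunk decomposition
lemma B_eq_chunks (bs : List Int) : bitstream_to_bytes_alt bs = pvChunks bs := by
  have := B_main bs.length bs rfl 0 []
  simpa [bitstream_to_bytes_alt] using this

-- ===== VERDICT (by name: the statement is the Claim_ definition above) =====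
theorem bitstream_to_bytes_spec : Claim_equal_bitstream_to_bytes := by
  intro bs _
  unfold Spec_bitstream_to_bytes
  rw [A_eq_chunks, B_eq_chunks]
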